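-- pv_equiv track=rewrite | github.com/Luminous-Dynamics/luminous-dynamics | 07-evolutionary-progression/core/luminous-os/monitor/sacred_process_monitor.py | _categorize_process
-- ===== SOURCE A (Python) =====
-- def _categorize_process(name):
--     """Categorize process by actual function"""
--     name_lower = name.lower()
--
--     # Productivity tools
--     if any(tool in name_lower for tool in ['code', 'vim', 'emacs', 'idea', 'sublime']):
--         return 'development'
--     elif any(tool in name_lower for tool in ['slack', 'teams', 'zoom', 'discord']):
--         return 'communication'
--     elif any(tool in name_lower for tool in ['chrome', 'firefox', 'safari', 'edge']):
--         return 'browser'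
--     elif any(tool in name_lower for tool in ['spotify', 'vlc', 'mpv']):
--         return 'media'
--     elif any(tool in name_lower for tool in ['docker', 'kubectl', 'terraform']):
--         return 'infrastructure'
--     elif name_lower.startswith(('kernel', 'systemd', 'init')):
--         return 'system'
--     else:
--         return 'other'
-- ===== SOURCE B (Python) =====
-- # B: single flat pass over a keyword->priority table, keeping the minimum
-- # matched priority in an accumulator; the category is looked up at the end.
-- _KEYWORD_PRIORITY = {
--     'code': 0, 'vim': 0, 'emacs': 0, 'idea': 0, 'sublime': 0,
--     'slack': 1, 'teams': 1, 'zoom': 1, 'discord': 1,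
--     'chrome': 2, 'firefox': 2, 'safari': 2, 'edge': 2,
--     'spotify': 3, 'vlc': 3, 'mpv': 3,
--     'docker': 4, 'kubectl': 4, 'terraform': 4,
-- }
-- _CATEGORIES = ['development', 'communication', 'browser', 'media', 'infrastructure']
--
-- def _categorize_process(name):
--     """Categorize process by actual function"""
--     name_lower = name.lower()
--     best = None
--     for keyword, priority in _KEYWORD_PRIORITY.items():
--         if keyword in name_lower and (best is None or priority < best):
--             best = priority
--     if best is not None:
--         return _CATEGORIES[best]
--     if name_lower.startswith(('kernel', 'systemd', 'init')):
--         return 'system'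
--     return 'other'
-- ===== Notes on version B (the rewrite author's own statement) =====
-- stated objective: alternative
-- what changed: Replaces the grouped if/elif chain of any() checks by one flat pass over a keyword->priority map that keeps the minimum matched priority in an accumulator and looks the category up at the end (startswith system check kept separate).
import Mathlib
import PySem

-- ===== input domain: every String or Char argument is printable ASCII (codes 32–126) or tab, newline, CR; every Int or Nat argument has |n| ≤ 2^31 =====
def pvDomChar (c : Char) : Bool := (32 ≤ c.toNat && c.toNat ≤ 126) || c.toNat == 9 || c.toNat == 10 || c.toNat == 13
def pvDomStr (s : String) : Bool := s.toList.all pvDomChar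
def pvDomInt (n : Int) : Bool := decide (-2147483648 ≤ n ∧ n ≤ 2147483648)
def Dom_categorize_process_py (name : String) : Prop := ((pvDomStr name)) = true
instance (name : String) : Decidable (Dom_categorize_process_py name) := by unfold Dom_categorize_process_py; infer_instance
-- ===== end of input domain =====

-- B replaces A's grouped if/elif chain by one flat min-priority scan over a keyword table (alternative decomposition, same cost).

-- ===== PORT A =====
def categorize_process_py (name : String) : String :=
  let name_lower := PySem.Str.lower name
  if (["code", "vim", "emacs", "idea", "sublime"].any fun tool => PySem.Str.isIn tool name_lower) then
    "development"
  else if (["slack", "teams", "zoom", "discord"].any fun tool => PySem.Str.isIn tool name_lower) then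
    "communication"
  else if (["chrome", "firefox", "safari", "edge"].any fun tool => PySem.Str.isIn tool name_lower) then
    "browser"
  else if (["spotify", "vlc", "mpv"].any fun tool => PySem.Str.isIn tool name_lower) then
    "media"
  else if (["docker", "kubectl", "terraform"].any fun tool => PySem.Str.isIn tool name_lower) then
    "infrastructure"
  else if (["kernel", "systemd", "init"].any fun p => PySem.Str.startswith name_lower p) then
    "system"
  else
    "other"

-- ===== PORT B =====
-- the keyword -> priority table (Source B's _KEYWORD_PRIORITY, in insertion order)
def pvKeywordPriority : List (String × Int) :=
  [ ("code", 0), ("vim", 0), ("emacs", 0), ("idea", 0), ("sublime", 0),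
    ("slack", 1), ("teams", 1), ("zoom", 1), ("discord", 1),
    ("chrome", 2), ("firefox", 2), ("safari", 2), ("edge", 2),
    ("spotify", 3), ("vlc", 3), ("mpv", 3),
    ("docker", 4), ("kubectl", 4), ("terraform", 4) ]

def pvCategories : List String :=
  ["development", "communication", "browser", "media", "infrastructure"]

-- Source B's for-loop: keep the minimum matched priority in the accumulator `best`
def pvScan (nl : String) (best : Option Int) : List (String × Int) → Option Int
  | [] => best
  | (kw, p) :: rest =>
      pvScan nl
        (if PySem.Str.isIn kw nl && (match best with | none => true | some q => decide (p < q))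
         then some p else best) rest

def categorize_process_py_alt (name : String) : String :=
  let name_lower := PySem.Str.lower name
  match pvScan name_lower none pvKeywordPriority with
  | some b => (PySem.List.pyGet? pvCategories b).getD ""   -- index is always 0..4, so in range
  | none =>
      if (["kernel", "systemd", "init"].any fun p => PySem.Str.startswith name_lower p) then "system"
      else "other"

-- ===== PRECONDITION & SPEC =====
def Spec_categorize_process_py (name : String) (out : String) : Prop := out = categorize_process_py_alt name
instance (name : String) (out : String) : Decidable (Spec_categorize_process_py name out) := by unfold Spec_categorize_process_py; infer_instance

-- ===== CLAIM (what is proved, stated in full; the proofs are below) =====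
def Claim_equal_categorize_process_py : Prop := ∀ (name : String), Dom_categorize_process_py name → Spec_categorize_process_py name (categorize_process_py name)

-- ===== LEMMAS AND PROOFS =====

theorem pvScan_append (nl : String) (best : Option Int) (l1 l2 : List (String × Int)) :
    pvScan nl best (l1 ++ l2) = pvScan nl (pvScan nl best l1) l2 := by
  induction l1 generalizing best with
  | nil => rfl
  | cons e rest ih => cases e; simp only [List.cons_append, pvScan]; exact ih _

-- once `best = some q` is at most every remaining priority, the scan never updates it
theorem pvScan_absorb (nl : String) (q : Int) (l : List (String × Int))
    (h : ∀ e ∈ l, q ≤ e.2) : pvScan nl (some q) l = some q := by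
  induction l with
  | nil => rfl
  | cons e rest ih =>
    cases e with
    | mk kw p =>
      have hq : q ≤ p := h (kw, p) (List.mem_cons_self ..)
      have : decide (p < q) = false := by simp; omega
      simp only [pvScan, this, Bool.and_false]
      exact ih fun e he => h e (List.mem_cons_of_mem _ he)

-- scanning a uniform-priority group from `none` yields `some p` iff some keyword of the group matches
theorem pvScan_group (nl : String) (p : Int) (l rest : List (String × Int))
    (hu : ∀ e ∈ l, e.2 = p) :
    pvScan nl none (l ++ rest) =
      pvScan nl (if l.any (fun e => PySem.Str.isIn e.1 nl) then some p else none) rest := by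
  induction l with
  | nil => simp
  | cons e l' ih =>
    cases e with
    | mk kw p' =>
      have hp : p' = p := hu (kw, p') (List.mem_cons_self ..)
      subst hp
      by_cases hm : PySem.Str.isIn kw nl = true
      · simp only [List.cons_append, pvScan, hm, Bool.true_and, List.any_cons, Bool.true_or,
          if_pos]
        rw [pvScan_append, pvScan_absorb nl p' l' (fun e he => le_of_eq (hu e (List.mem_cons_of_mem _ he)).symm)]
      · have hm' : PySem.Str.isIn kw nl = false := by simpa using hm
        simp only [List.cons_append, pvScan, hm', Bool.false_and, List.any_cons,
          Bool.false_or, Bool.false_eq_true, if_false]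
        exact ih fun e he => hu e (List.mem_cons_of_mem _ he)

-- the full table scan, characterised as a priority cascade
theorem pvScan_table (nl : String) :
    pvScan nl none pvKeywordPriority =
      (if (["code", "vim", "emacs", "idea", "sublime"].any fun t => PySem.Str.isIn t nl) then some 0
       else if (["slack", "teams", "zoom", "discord"].any fun t => PySem.Str.isIn t nl) then some 1
       else if (["chrome", "firefox", "safari", "edge"].any fun t => PySem.Str.isIn t nl) then some 2
       else if (["spotify", "vlc", "mpv"].any fun t => PySem.Str.isIn t nl) then some 3
       else if (["docker", "kubectl", "terraform"].any fun t => PySem.Str.isIn t nl) then some 4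
       else none) := by
  have h0 : pvKeywordPriority =
      [("code", 0), ("vim", 0), ("emacs", 0), ("idea", 0), ("sublime", (0:Int))] ++
      ([("slack", 1), ("teams", 1), ("zoom", 1), ("discord", 1)] ++
       ([("chrome", 2), ("firefox", 2), ("safari", 2), ("edge", 2)] ++
        ([("spotify", 3), ("vlc", 3), ("mpv", 3)] ++
         [("docker", 4), ("kubectl", 4), ("terraform", 4)]))) := rfl
  rw [h0, pvScan_group nl 0 _ _ (by decide)]
  by_cases a0 : (["code", "vim", "emacs", "idea", "sublime"].any fun t => PySem.Str.isIn t nl) = true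
  · have : (List.any [("code", (0:Int)), ("vim", 0), ("emacs", 0), ("idea", 0), ("sublime", 0)]
        fun e => PySem.Str.isIn e.1 nl) = true := by simpa using a0
    rw [if_pos this, if_pos a0, pvScan_absorb nl 0 _ (by decide)]
  · rw [if_neg (by simpa using a0), if_neg a0, pvScan_group nl 1 _ _ (by decide)]
    by_cases a1 : (["slack", "teams", "zoom", "discord"].any fun t => PySem.Str.isIn t nl) = true
    · have : (List.any [("slack", (1:Int)), ("teams", 1), ("zoom", 1), ("discord", 1)]
          fun e => PySem.Str.isIn e.1 nl) = true := by simpa using a1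
      rw [if_pos this, if_pos a1, pvScan_absorb nl 1 _ (by decide)]
    · rw [if_neg (by simpa using a1), if_neg a1, pvScan_group nl 2 _ _ (by decide)]
      by_cases a2 : (["chrome", "firefox", "safari", "edge"].any fun t => PySem.Str.isIn t nl) = true
      · have : (List.any [("chrome", (2:Int)), ("firefox", 2), ("safari", 2), ("edge", 2)]
            fun e => PySem.Str.isIn e.1 nl) = true := by simpa using a2
        rw [if_pos this, if_pos a2, pvScan_absorb nl 2 _ (by decide)]
      · rw [if_neg (by simpa using a2), if_neg a2, pvScan_group nl 3 _ _ (by decide)]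
        by_cases a3 : (["spotify", "vlc", "mpv"].any fun t => PySem.Str.isIn t nl) = true
        · have : (List.any [("spotify", (3:Int)), ("vlc", 3), ("mpv", 3)]
              fun e => PySem.Str.isIn e.1 nl) = true := by simpa using a3
          rw [if_pos this, if_pos a3, pvScan_absorb nl 3 _ (by decide)]
        · rw [if_neg (by simpa using a3), if_neg a3,
            ← List.append_nil [("docker", (4:Int)), ("kubectl", 4), ("terraform", 4)],
            pvScan_group nl 4 _ _ (by decide)]
          by_cases a4 : (["docker", "kubectl", "terraform"].any fun t => PySem.Str.isIn t nl) = true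
          · have : (List.any [("docker", (4:Int)), ("kubectl", 4), ("terraform", 4)]
                fun e => PySem.Str.isIn e.1 nl) = true := by simpa using a4
            rw [if_pos this, if_pos a4]; rfl
          · rw [if_neg (by simpa using a4), if_neg a4]; rfl

-- ===== VERDICT (by name: the statement is the Claim_ definition above) =====
theorem categorize_process_py_spec : Claim_equal_categorize_process_py := by
  intro name _
  show categorize_process_py name = categorize_process_py_alt name
  simp only [categorize_process_py, categorize_process_py_alt, pvScan_table]
  split_ifs <;> rfl
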